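-- pv_equiv track=rewrite | github.com/ShabalalaWATP/AttackTree | backend/app/api/threat_models.py | _merge_dfd_components
-- ===== SOURCE A (Python) =====
-- from typing import Any, Optional
--
-- def _normalize_text(value: Any) -> str:
--     return str(value or "").strip()
--
-- def _component_quality_score(component: dict[str, Any]) -> tuple[int, int]:
--     populated = sum(
--         1
--         for key in ("description", "technology", "attack_surface", "zone_name")
--         if _normalize_text(component.get(key))
--     )
--     text_length = sum(len(_normalize_text(component.get(key))) for key in ("description", "attack_surface"))
--     return populated, text_length
--
-- def _merge_dfd_components(components: list[dict[str, Any]]) -> list[dict[str, Any]]: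
--     merged: dict[str, dict[str, Any]] = {}
--     for component in components:
--         component_id = _normalize_text(component.get("id"))
--         if not component_id:
--             continue
--         existing = merged.get(component_id)
--         if existing is None or _component_quality_score(component) > _component_quality_score(existing):
--             merged[component_id] = component
--     return list(merged.values())
-- ===== SOURCE B (Python) =====
-- def _normalize_text(value):
--     return str(value or "").strip()
--
-- def _component_quality_score(component):
--     populated = sum(
--         1
--         for key in ("description", "technology", "attack_surface", "zone_name")
--         if _normalize_text(component.get(key))
--     )
--     text_length = sum(len(_normalize_text(component.get(key))) for key in ("description", "attack_surface"))
--     return populated, text_length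
--
-- def _merge_dfd_components(components):
--     groups = {}
--     for component in components:
--         component_id = _normalize_text(component.get("id"))
--         if component_id:
--             groups.setdefault(component_id, []).append(component)
--     return [max(group, key=_component_quality_score) for group in groups.values()]
-- ===== Notes on version B (the rewrite author's own statement) =====
-- stated objective: alternative
-- what changed: Replaces A's single-pass running-best dict (compare each component against the stored best for its id) with a two-phase partition-then-reduce: first group components by normalized id into a dict of lists, then map max(group, key=_component_quality_score) over the groups.
import Mathlib
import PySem

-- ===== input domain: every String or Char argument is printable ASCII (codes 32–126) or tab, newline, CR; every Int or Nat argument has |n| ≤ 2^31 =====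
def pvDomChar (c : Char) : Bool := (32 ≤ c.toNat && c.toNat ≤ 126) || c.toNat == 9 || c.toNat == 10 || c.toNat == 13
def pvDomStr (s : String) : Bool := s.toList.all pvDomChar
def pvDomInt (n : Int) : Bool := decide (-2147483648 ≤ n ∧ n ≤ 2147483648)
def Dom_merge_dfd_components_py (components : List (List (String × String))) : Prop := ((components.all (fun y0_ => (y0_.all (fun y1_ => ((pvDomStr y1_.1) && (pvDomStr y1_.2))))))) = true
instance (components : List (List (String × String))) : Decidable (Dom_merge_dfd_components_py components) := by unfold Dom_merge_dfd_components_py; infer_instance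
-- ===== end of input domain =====

-- B groups components by normalized id first and then takes the per-group maximum by quality
-- score, replacing A's single-pass running-best dict; objective: alternative decomposition, same cost.

-- ===== PORT A =====
-- _normalize_text(value): str(value or "").strip()  (values here are Optional[str])
def pvNormalize (v : Option String) : String := PySem.Str.strip (v.getD "")

-- _component_quality_score(component) -> (populated, text_length)
def pvScore (component : List (String × String)) : Int × Int :=
  let populated : Int :=
    (["description", "technology", "attack_surface", "zone_name"]).foldl
      (fun acc key => if pvNormalize ((PySem.Dict.mk component).get? key) ≠ "" then acc + 1 else acc) 0
  let textLength : Int :=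
    (["description", "attack_surface"]).foldl
      (fun acc key => acc + PySem.Str.len (pvNormalize ((PySem.Dict.mk component).get? key))) 0
  (populated, textLength)

-- Python tuple comparison 'a > b' on (int, int), lexicographic
def pvScoreGt (a b : Int × Int) : Bool := decide (b.1 < a.1) || (a.1 == b.1 && decide (b.2 < a.2))

-- the body of A's for-loop
def pvStepA (merged : PySem.Dict String (List (String × String))) (component : List (String × String)) :
    PySem.Dict String (List (String × String)) :=
  let cid := pvNormalize ((PySem.Dict.mk component).get? "id")
  if cid = "" then merged
  else
    match merged.get? cid with
    | none => merged.insert cid component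
    | some existing =>
        if pvScoreGt (pvScore component) (pvScore existing) then merged.insert cid component else merged

def merge_dfd_components_py (components : List (List (String × String))) : List (List (String × String)) :=
  (components.foldl pvStepA PySem.Dict.empty).values

-- ===== PORT B =====
-- the body of B's grouping loop: groups.setdefault(cid, []).append(component)
def pvStepB (groups : PySem.Dict String (List (List (String × String)))) (component : List (String × String)) :
    PySem.Dict String (List (List (String × String))) :=
  let cid := pvNormalize ((PySem.Dict.mk component).get? "id")
  if cid = "" then groups else groups.modify cid [] (· ++ [component])

-- max(group, key=_component_quality_score)  (tuple key → max2?; groups are never empty)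
def pvBest (group : List (List (String × String))) : List (String × String) :=
  (PySem.List.max2? group (fun c => (pvScore c).1) (fun c => (pvScore c).2)).getD []

def merge_dfd_components_py_alt (components : List (List (String × String))) : List (List (String × String)) :=
  let groups := components.foldl pvStepB PySem.Dict.empty
  groups.values.map pvBest

-- ===== PRECONDITION & SPEC =====
def Spec_merge_dfd_components_py (components : List (List (String × String))) (out : List (List (String × String))) : Prop := out = merge_dfd_components_py_alt components
instance (components : List (List (String × String))) (out : List (List (String × String))) : Decidable (Spec_merge_dfd_components_py components out) := by unfold Spec_merge_dfd_components_py; infer_instance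

-- ===== CLAIM (what is proved, stated in full; the proofs are below) =====
def Claim_equal_merge_dfd_components_py : Prop := ∀ (components : List (List (String × String))), Dom_merge_dfd_components_py components → Spec_merge_dfd_components_py components (merge_dfd_components_py components)

-- ===== LEMMAS AND PROOFS =====

-- max2?'s step condition is exactly Python's tuple '>' (pvScoreGt)
lemma pv_cond_eq (a b : Int × Int) :
    (decide (b.1 < a.1) || (!decide (a.1 < b.1) && decide (b.2 < a.2))) = pvScoreGt a b := by
  unfold pvScoreGt
  by_cases h1 : b.1 < a.1 <;> by_cases h2 : a.1 < b.1 <;> by_cases h3 : a.1 = b.1 <;>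
    simp [h1, h2, h3] <;> omega

lemma pv_max2?_foldl_some {α : Type} (k1 k2 : α → Int) (l : List α) (m : α) :
    ∃ m', List.foldl
      (fun acc x =>
        match acc with
        | none => some x
        | some m =>
          if (decide (k1 m < k1 x) || !decide (k1 x < k1 m) && decide (k2 m < k2 x)) = true then some x
          else some m) (some m) l = some m' := by
  induction l generalizing m with
  | nil => exact ⟨m, rfl⟩
  | cons x t ih =>
      simp only [List.foldl_cons]
      split <;> exact ih _

lemma pv_best_isSome (x : List (String × String)) (l : List (List (String × String))) :
    ∃ m, PySem.List.max2? (x :: l) (fun c => (pvScore c).1) (fun c => (pvScore c).2) = some m := by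
  simpa [PySem.List.max2?] using pv_max2?_foldl_some (fun c => (pvScore c).1) (fun c => (pvScore c).2) l x

-- running-best step: best of (group ++ [c]) for a nonempty group
lemma pv_best_append (group : List (List (String × String))) (hne : group ≠ [])
    (c : List (String × String)) :
    pvBest (group ++ [c]) =
      if pvScoreGt (pvScore c) (pvScore (pvBest group)) then c else pvBest group := by
  obtain ⟨x, l, rfl⟩ : ∃ x l, group = x :: l := by
    cases group with
    | nil => exact absurd rfl hne
    | cons x l => exact ⟨x, l, rfl⟩
  obtain ⟨m, hm⟩ := pv_best_isSome x l
  unfold pvBest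
  simp only [PySem.List.max2?, List.cons_append, List.foldl_cons, List.foldl_append] at hm ⊢
  rw [hm]
  show (if (decide ((pvScore m).1 < (pvScore c).1) ||
          !decide ((pvScore c).1 < (pvScore m).1) && decide ((pvScore m).2 < (pvScore c).2)) = true
      then some c else some m).getD [] =
    if pvScoreGt (pvScore c) (pvScore m) = true then c else m
  rw [pv_cond_eq (pvScore c) (pvScore m)]
  split <;> simp

-- first-match lookup commutes with the per-entry pvBest projection
lemma pv_get?_map (l : List (String × List (List (String × String)))) (k : String) :
    (PySem.Dict.mk (l.map (fun p => (p.1, pvBest p.2)))).get? k =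
      ((PySem.Dict.mk l).get? k).map pvBest := by
  induction l with
  | nil => rfl
  | cons p t ih =>
      cases p with
      | mk a b =>
          simp only [List.map_cons, PySem.Dict.get?_mk_cons]
          split <;> simp [ih]

-- the loop invariant tying A's merged dict to B's groups dict
def pvInv (m : PySem.Dict String (List (String × String)))
    (g : PySem.Dict String (List (List (String × String)))) : Prop :=
  g.keys.Nodup ∧ (∀ p ∈ g.items, p.2 ≠ []) ∧
    m.items = g.items.map (fun p => (p.1, pvBest p.2))

lemma pv_contains_congr (m : PySem.Dict String (List (String × String)))
    (g : PySem.Dict String (List (List (String × String))))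
    (h : m.items = g.items.map (fun p => (p.1, pvBest p.2))) (k : String) :
    m.contains k = g.contains k := by
  simp only [PySem.Dict.contains, h, List.any_map]
  rfl

lemma pv_step (m : PySem.Dict String (List (String × String)))
    (g : PySem.Dict String (List (List (String × String))))
    (hI : pvInv m g) (c : List (String × String)) : pvInv (pvStepA m c) (pvStepB g c) := by
  obtain ⟨hnd, hne, hit⟩ := hI
  unfold pvStepA pvStepB
  set cid := pvNormalize ((PySem.Dict.mk c).get? "id") with hcid
  by_cases h0 : cid = ""
  · simp [h0]; exact ⟨hnd, hne, hit⟩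
  · simp only [h0, if_false]
    have hmk : m = PySem.Dict.mk (g.items.map (fun p => (p.1, pvBest p.2))) := by
      cases m; simpa using hit
    have hget : m.get? cid = (g.get? cid).map pvBest := by
      rw [hmk]
      have := pv_get?_map g.items cid
      simpa using this
    have hcont := pv_contains_congr m g hit cid
    by_cases hc : g.contains cid = true
    · -- existing group gr
      obtain ⟨gr, hgr⟩ : ∃ gr, g.get? cid = some gr := by
        have : (g.get? cid).isSome := by rw [← PySem.Dict.contains_eq_isSome_get?]; exact hc
        exact Option.isSome_iff_exists.mp this
      have hgrne : gr ≠ [] := hne _ (PySem.Dict.mem_items_of_get?_eq_some g hgr)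
      have hmget : m.get? cid = some (pvBest gr) := by rw [hget, hgr]; rfl
      have hmc : m.contains cid = true := by rw [hcont]; exact hc
      have hmod : g.modify cid [] (· ++ [c]) = g.insert cid (gr ++ [c]) := by
        unfold PySem.Dict.modify
        rw [PySem.Dict.getD_of_get?_eq_some g [] hgr]
      have huniq : ∀ p ∈ g.items, p.1 = cid → p.2 = gr := by
        intro p hp hpk
        have hp' : (p.1, p.2) ∈ g.items := by simpa using hp
        have h1 := PySem.Dict.get?_of_mem_items g hp' hnd
        rw [hpk, hgr] at h1
        exact (Option.some.inj h1).symm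
      rw [hmget, hmod]
      show pvInv (if pvScoreGt (pvScore c) (pvScore (pvBest gr)) = true then m.insert cid c else m)
        (g.insert cid (gr ++ [c]))
      have hbest : pvBest (gr ++ [c]) =
          if pvScoreGt (pvScore c) (pvScore (pvBest gr)) then c else pvBest gr :=
        pv_best_append gr hgrne c
      refine ⟨PySem.Dict.nodup_keys_insert g cid (gr ++ [c]) hnd, ?_, ?_⟩
      · intro p hp
        rcases (PySem.Dict.mem_items_insert g cid (gr ++ [c]) p).mp hp with h | ⟨hp', _⟩
        · rw [h]; simp
        · exact hne _ hp'
      · by_cases hsc : pvScoreGt (pvScore c) (pvScore (pvBest gr)) = true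
        · rw [if_pos hsc, PySem.Dict.items_insert_of_contains m c hmc,
              PySem.Dict.items_insert_of_contains g (gr ++ [c]) hc, hit,
              List.map_map, List.map_map]
          apply List.map_congr_left
          intro p hp
          by_cases hk : p.1 = cid
          · simp only [Function.comp, hk, beq_self_eq_true, if_true]
            rw [hbest, if_pos hsc]
          · simp [Function.comp, hk]
        · rw [if_neg hsc, PySem.Dict.items_insert_of_contains g (gr ++ [c]) hc, hit,
              List.map_map]
          apply List.map_congr_left
          intro p hp
          by_cases hk : p.1 = cid
          · simp only [Function.comp, hk, beq_self_eq_true, if_true]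
            rw [huniq p hp hk, hbest, if_neg hsc]
          · simp [Function.comp, hk]
    · -- new id
      have hc' : g.contains cid = false := by simpa using hc
      have hmc : m.contains cid = false := by rw [hcont]; exact hc'
      have hmget : m.get? cid = none := by
        rw [hget, (PySem.Dict.get?_eq_none_iff_contains g cid).mpr hc']; rfl
      have hmod : g.modify cid [] (· ++ [c]) = g.insert cid [c] := by
        unfold PySem.Dict.modify
        rw [PySem.Dict.getD_of_not_contains g [] hc']
        rfl
      rw [hmget, hmod]
      refine ⟨PySem.Dict.nodup_keys_insert g cid [c] hnd, ?_, ?_⟩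
      · intro p hp
        rcases (PySem.Dict.mem_items_insert g cid [c] p).mp hp with h | ⟨hp', _⟩
        · rw [h]; simp
        · exact hne _ hp'
      · rw [PySem.Dict.items_insert_of_not_contains m c hmc,
            PySem.Dict.items_insert_of_not_contains g [c] hc', hit, List.map_append]
        rfl

lemma pv_fold_inv (cs : List (List (String × String)))
    (m : PySem.Dict String (List (String × String)))
    (g : PySem.Dict String (List (List (String × String)))) (hI : pvInv m g) :
    pvInv (cs.foldl pvStepA m) (cs.foldl pvStepB g) := by
  induction cs generalizing m g with
  | nil => exact hI
  | cons c t ih => exact ih _ _ (pv_step m g hI c)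

-- ===== VERDICT (by name: the statement is the Claim_ definition above) =====
theorem merge_dfd_components_py_spec : Claim_equal_merge_dfd_components_py := by
  intro components _
  unfold Spec_merge_dfd_components_py merge_dfd_components_py merge_dfd_components_py_alt
  have hI : pvInv (components.foldl pvStepA PySem.Dict.empty)
      (components.foldl pvStepB PySem.Dict.empty) := by
    apply pv_fold_inv
    exact ⟨PySem.Dict.nodup_keys_empty, by intro p hp; simp [PySem.Dict.empty] at hp, rfl⟩
  obtain ⟨_, _, hit⟩ := hI
  simp [PySem.Dict.values, hit, List.map_map, Function.comp]
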